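-- pv_equiv track=rewrite | github.com/LordBrom/programming-challenges | adventofcode/y2015/day8.py | part2
-- ===== SOURCE A (Python) =====
-- def countCharacters(string):
--     string = string[1:-1]
--     literal = 2
--     memory = 0
--     i = 0
--     while i < len(string):
--         char = string[i]
--         if char != "\\":
--             literal += 1
--             memory += 1
--         else:
--             if string[i + 1] in ["\\", '"']:
--                 literal += 2
--                 memory += 1
--                 i += 1
--             else:
--                 literal += 4
--                 memory += 1
--                 i += 3
--         i += 1
--
--     return literal, memory
--
-- def encode(string):
--     result = ""
--     for s in string:
--         if s in ["\\", '"']: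
--             result += "\\"
--         result += s
--     return '"' + result + '"'
--
-- def part2(data, test=False) -> str:
--     literalValue = 0
--     memoryValue = 0
--     for d in data:
--         literal, memory = countCharacters(encode(d))
--         literalValue += literal
--         memoryValue += memory
--     return literalValue - memoryValue
-- ===== SOURCE B (Python) =====
-- def part2(data, test=False):
--     # Direct closed form: encoding adds two surrounding quotes plus one
--     # backslash per existing backslash or double-quote in each string.
--     return sum(2 + sum(1 for c in d if c in '\\"') for d in data)
-- ===== Notes on version B (the rewrite author's own statement) =====
-- stated objective: faster
-- what changed: Replaces the encode-then-reparse pipeline (build the escaped string char by char, then re-scan it with an escape-decoding while loop tracking literal and memory counts) by a direct one-pass sum of the closed-form per-string overhead 2 + number of backslashes and double quotes; no intermediate string is built.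
import Mathlib
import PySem

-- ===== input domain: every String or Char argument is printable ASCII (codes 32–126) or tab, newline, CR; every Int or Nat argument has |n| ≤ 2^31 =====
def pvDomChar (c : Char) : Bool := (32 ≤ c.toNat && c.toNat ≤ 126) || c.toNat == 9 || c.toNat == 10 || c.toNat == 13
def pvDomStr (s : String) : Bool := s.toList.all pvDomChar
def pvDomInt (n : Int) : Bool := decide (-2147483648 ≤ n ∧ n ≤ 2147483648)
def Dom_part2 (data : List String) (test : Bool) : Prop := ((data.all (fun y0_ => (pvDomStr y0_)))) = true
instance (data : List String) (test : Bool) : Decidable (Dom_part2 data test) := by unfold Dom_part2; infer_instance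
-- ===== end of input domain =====

-- B replaces A's encode-then-reparse pipeline by the closed-form per-string overhead
-- 2 + (# of '\' and '"'); objective: simpler.

-- ===== PORT A =====
-- the while loop of countCharacters, scanning left to right over the remaining chars
-- (i += k becomes dropping k chars). Python raises IndexError when string[i+1] is read
-- past the end; that branch is unreachable for the encoded strings part2 feeds in, and
-- the port returns the accumulators there.
def ccLoop : List Char → Int → Int → Int × Int
  | [], lit, mem => (lit, mem)
  | c :: rest, lit, mem =>
    if c ≠ '\\' then ccLoop rest (lit + 1) (mem + 1)
    else
      match rest with
      | c2 :: rest2 =>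
        if c2 = '\\' ∨ c2 = '"' then ccLoop rest2 (lit + 2) (mem + 1)
        else ccLoop (rest2.drop 2) (lit + 4) (mem + 1)  -- i += 3; i += 1
      | [] => (lit, mem)  -- Python: IndexError (unreachable from part2)
  termination_by l => l.length
  decreasing_by
    · simp
    · simp
    · simp; omega

def countCharactersA (cs : List Char) : Int × Int :=
  ccLoop (PySem.List.slice cs (some 1) (some (-1))) 2 0

def encodeA (s : String) : List Char :=
  '"' :: (s.toList.foldl (fun r c => (if c = '\\' ∨ c = '"' then r ++ ['\\'] else r) ++ [c]) []) ++ ['"']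

def part2 (data : List String) (test : Bool) : Int :=
  let p := data.foldl (fun (acc : Int × Int) d =>
    let lm := countCharactersA (encodeA d)
    (acc.1 + lm.1, acc.2 + lm.2)) (0, 0)
  p.1 - p.2

-- ===== PORT B =====
def part2_alt (data : List String) (test : Bool) : Int :=
  data.foldl (fun acc d =>
    acc + (2 + (d.toList.countP (fun c => c == '\\' || c == '"') : Int))) 0

-- ===== PRECONDITION & SPEC =====
def Spec_part2 (data : List String) (test : Bool) (out : Int) : Prop := out = part2_alt data test
instance (data : List String) (test : Bool) (out : Int) : Decidable (Spec_part2 data test out) := by unfold Spec_part2; infer_instance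

-- ===== CLAIM (what is proved, stated in full; the proofs are below) =====
def Claim_equal_part2 : Prop := ∀ (data : List String) (test : Bool), Dom_part2 data test → Spec_part2 data test (part2 data test)

-- ===== LEMMAS AND PROOFS =====

-- structural form of the escaping fold
def escRec : List Char → List Char
  | [] => []
  | c :: t => (if c = '\\' ∨ c = '"' then ['\\', c] else [c]) ++ escRec t

theorem foldl_escRec (l : List Char) (acc : List Char) :
    l.foldl (fun r c => (if c = '\\' ∨ c = '"' then r ++ ['\\'] else r) ++ [c]) acc
      = acc ++ escRec l := by
  induction l generalizing acc with
  | nil => simp [escRec]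
  | cons c t ih =>
    simp only [List.foldl_cons, escRec]
    rw [ih]
    split_ifs <;> simp

theorem encodeA_eq (s : String) : encodeA s = '"' :: escRec s.toList ++ ['"'] := by
  simp [encodeA, foldl_escRec]

theorem slice_quotes (xs : List Char) :
    PySem.List.slice ('"' :: xs ++ ['"']) (some 1) (some (-1)) = xs := by
  simp [PySem.List.slice, PySem.List.clampIdx]
  rw [if_neg (by omega)]
  simp

theorem ccLoop_escRec (l : List Char) (lit mem : Int) :
    ccLoop (escRec l) lit mem
      = (lit + l.length + (l.countP (fun c => c == '\\' || c == '"') : Int),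
         mem + l.length) := by
  induction l generalizing lit mem with
  | nil => simp [escRec, ccLoop]
  | cons c t ih =>
    by_cases hc : c = '\\' ∨ c = '"'
    · have hcb : (c == '\\' || c == '"') = true := by
        rcases hc with h | h <;> simp [h]
      simp only [escRec, if_pos hc, List.cons_append, List.nil_append]
      rw [show ccLoop ('\\' :: c :: escRec t) lit mem
            = ccLoop (escRec t) (lit + 2) (mem + 1) by
          simp [ccLoop, hc]]
      rw [ih]
      simp only [List.countP_cons, hcb, Prod.mk.injEq]
      constructor <;> (push_cast [List.length_cons]; ring)
    · have hcb : (c == '\\' || c == '"') = false := by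
        simp only [not_or] at hc
        simp [hc.1, hc.2]
      have hcne : c ≠ '\\' := by
        intro h; exact absurd (Or.inl h) hc
      simp only [escRec, if_neg hc, List.cons_append, List.nil_append]
      rw [show ccLoop (c :: escRec t) lit mem
            = ccLoop (escRec t) (lit + 1) (mem + 1) by
          rw [ccLoop.eq_def]; simp [hcne]]
      rw [ih]
      simp only [List.countP_cons, hcb, Prod.mk.injEq]
      constructor <;> (push_cast [List.length_cons]; ring)

theorem perString (d : String) :
    countCharactersA (encodeA d)
      = (2 + d.toList.length + (d.toList.countP (fun c => c == '\\' || c == '"') : Int),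
         (d.toList.length : Int)) := by
  rw [encodeA_eq, countCharactersA, slice_quotes, ccLoop_escRec]
  simp

theorem fold_diff (data : List String) (a b : Int) :
    (data.foldl (fun (acc : Int × Int) d =>
        let lm := countCharactersA (encodeA d)
        (acc.1 + lm.1, acc.2 + lm.2)) (a, b)).1
      - (data.foldl (fun (acc : Int × Int) d =>
        let lm := countCharactersA (encodeA d)
        (acc.1 + lm.1, acc.2 + lm.2)) (a, b)).2
      = data.foldl (fun acc d =>
          acc + (2 + (d.toList.countP (fun c => c == '\\' || c == '"') : Int))) (a - b) := by
  induction data generalizing a b with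
  | nil => simp
  | cons d t ih =>
    rw [List.foldl_cons, List.foldl_cons, perString]
    rw [ih]
    congr 1
    push_cast
    ring

-- ===== VERDICT (by name: the statement is the Claim_ definition above) =====
theorem part2_spec : Claim_equal_part2 := by
  intro data test _
  show part2 data test = part2_alt data test
  unfold part2 part2_alt
  simpa using fold_diff data 0 0
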